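-- pv_equiv track=rewrite | github.com/mohamadsolkhannawawi/informatics-practicum-portfolio | Semester-4/Algorithm-Strategy-Analysis/03-Algorithm-Strategy-Analysis/GroupMinimum.py | count_minimum_groups
-- ===== SOURCE A (Python) =====
-- def merge_sort_intervals(intervals):
--     # Fungsi untuk mengurutkan interval berdasarkan waktu mulai menggunakan Divide and Conquer
--     if len(intervals) <= 1:
--         return intervals
--
--     mid = len(intervals) // 2
--     left = merge_sort_intervals(intervals[:mid])
--     right = merge_sort_intervals(intervals[mid:])
--
--     return merge(left, right)
--
-- def merge(left, right):
--     # Fungsi untuk menggabungkan dua bagian terurut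
--     result = []
--     i = j = 0
--     while i < len(left) and j < len(right):
--         if left[i][0] <= right[j][0]:
--             result.append(left[i])
--             i += 1
--         else:
--             result.append(right[j])
--             j += 1
--     result.extend(left[i:])
--     result.extend(right[j:])
--     return result
--
-- def count_minimum_groups(intervals):
--     if not intervals:
--         return 0
--
--     # Urutkan interval terlebih dahulu
--     sorted_intervals = merge_sort_intervals(intervals)
--
--     groups = []
--
--     for interval in sorted_intervals:
--         placed = False
--         for group in groups:
--             # Jika interval tidak tumpang tindih dengan interval terakhir dalam grup, tambahkan ke grup tersebut
--             if group[-1][1] < interval[0]: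
--                 group.append(interval)
--                 placed = True
--                 break
--         if not placed:
--             # Jika tidak ada grup yang cocok, buat grup baru
--             groups.append([interval])
--
--     return len(groups)
-- ===== SOURCE B (Python) =====
-- def count_minimum_groups(intervals):
--     # Sweep over the intervals in sorted-by-start order, keeping only the end
--     # times of already-seen intervals that still reach the current start; the
--     # answer is the maximum size of that active set (no groups are built).
--     ivs = sorted(intervals, key=lambda iv: iv[0])
--     active = []
--     best = 0
--     for iv in ivs:
--         active = [e for e in active if e >= iv[0]]
--         active.append(iv[1])
--         if len(active) > best:
--             best = len(active)
--     return best
-- ===== Notes on version B (the rewrite author's own statement) =====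
-- stated objective: alternative
-- what changed: B replaces A's hand-written merge sort plus greedy first-fit placement into explicit groups by a sweep over the intervals in sorted-by-start order that keeps only the multiset of still-reaching end times (the answer is the maximum size of that active set), so no groups are ever built; the sort is the library sorted().
-- outside the precondition, e.g. on count_minimum_groups([[5]]): A returns 1, B raises IndexError; on count_minimum_groups([[0, 10], [20]]): A returns 1, B raises IndexError
import Mathlib
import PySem

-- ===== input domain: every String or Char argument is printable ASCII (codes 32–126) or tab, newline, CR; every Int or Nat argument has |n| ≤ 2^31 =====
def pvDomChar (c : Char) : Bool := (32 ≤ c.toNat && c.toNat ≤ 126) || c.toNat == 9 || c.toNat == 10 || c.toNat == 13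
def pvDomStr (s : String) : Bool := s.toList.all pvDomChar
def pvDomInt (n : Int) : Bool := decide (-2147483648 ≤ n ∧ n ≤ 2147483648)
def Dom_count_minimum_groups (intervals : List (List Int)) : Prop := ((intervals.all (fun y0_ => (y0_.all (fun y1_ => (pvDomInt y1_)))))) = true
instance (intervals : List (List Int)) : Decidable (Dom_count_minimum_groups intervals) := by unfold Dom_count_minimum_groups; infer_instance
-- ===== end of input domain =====

-- B replaces A's hand-written merge sort + greedy first-fit grouping by a sweep over the
-- sorted-by-start intervals that keeps only the still-reaching end times (objective: alternative).


-- ===== PORT A =====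
-- Both ports read iv[0] / iv[1] / group[-1] via pyGetD; under Pre_ (every interval has
-- length ≥ 2; the groups A builds are nonempty) the defaults are never used, so the
-- ports are Python-exact there.
def pvStart (iv : List Int) : Int := PySem.List.pyGetD iv 0 0       -- iv[0]
def pvEnd (iv : List Int) : Int := PySem.List.pyGetD iv 1 0         -- iv[1]
def pvLastEnd (g : List (List Int)) : Int := pvEnd (PySem.List.pyGetD g (-1) ([] : List Int))  -- group[-1][1]

-- merge(left, right): the two-pointer while loop plus the trailing extends, as structural
-- recursion on the two lists (advancing i / j = dropping the consumed head).
def pvMergeLoop : List (List Int) → List (List Int) → List (List Int)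
  | [], right => right
  | left, [] => left
  | a :: left, b :: right =>
      if pvStart a ≤ pvStart b then a :: pvMergeLoop left (b :: right)
      else b :: pvMergeLoop (a :: left) right

-- merge_sort_intervals; intervals[:mid] / intervals[mid:] with 0 ≤ mid ≤ len are take/drop,
-- mid = len(intervals) // 2 of nonnegative numbers is Nat division
def merge_sort_intervals (l : List (List Int)) : List (List Int) :=
  if _h : l.length ≤ 1 then l
  else
    pvMergeLoop (merge_sort_intervals (l.take (l.length / 2)))
                (merge_sort_intervals (l.drop (l.length / 2)))
  termination_by l.length
  decreasing_by
    · simp only [List.length_take]; omega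
    · simp only [List.length_drop]; omega

-- the inner 'for group in groups' loop with its break / placed flag: put the interval into
-- the first fitting group (appending mutates that group in place), else append a new group
def pvPlace : List (List (List Int)) → List Int → List (List (List Int))
  | [], iv => [[iv]]
  | g :: gs, iv =>
      if pvLastEnd g < pvStart iv then (g ++ [iv]) :: gs
      else g :: pvPlace gs iv

def count_minimum_groups (intervals : List (List Int)) : Int :=
  if intervals = [] then 0
  else (((merge_sort_intervals intervals).foldl pvPlace []).length : Int)

-- ===== PORT B =====
-- one sweep step: active = [e for e in active if e >= iv[0]]; active.append(iv[1]);
--                 if len(active) > best: best = len(active)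
def pvSweepStep (st : List Int × Int) (iv : List Int) : List Int × Int :=
  let active := st.1.filter (fun e => decide (pvStart iv ≤ e)) ++ [pvEnd iv]
  (active, if (active.length : Int) > st.2 then (active.length : Int) else st.2)

def count_minimum_groups_alt (intervals : List (List Int)) : Int :=
  ((PySem.List.sorted intervals pvStart).foldl pvSweepStep ([], 0)).2

-- ===== PRECONDITION & SPEC =====
-- Pre_ excludes inputs containing an interval of length < 2: on those Python A raises
-- IndexError, except in degenerate cases (e.g. [[5]] or [[0,10],[20]]) where the short
-- interval happens never to be re-read and A still returns; Python B raises there.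
def Pre_count_minimum_groups (intervals : List (List Int)) : Prop :=
  ∀ iv ∈ intervals, 2 ≤ iv.length
instance (intervals : List (List Int)) : Decidable (Pre_count_minimum_groups intervals) := by
  unfold Pre_count_minimum_groups; infer_instance
def pvWitness_count_minimum_groups : List (List Int) := [[1, 3], [2, 5], [6, 8]]

def Spec_count_minimum_groups (intervals : List (List Int)) (out : Int) : Prop := out = count_minimum_groups_alt intervals
instance (intervals : List (List Int)) (out : Int) : Decidable (Spec_count_minimum_groups intervals out) := by unfold Spec_count_minimum_groups; infer_instance

-- ===== CLAIM (what is proved, stated in full; the proofs are below) =====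
def Claim_equal_count_minimum_groups : Prop := ∀ (intervals : List (List Int)), Dom_count_minimum_groups intervals → Pre_count_minimum_groups intervals → Spec_count_minimum_groups intervals (count_minimum_groups intervals)

-- ===== LEMMAS AND PROOFS =====

-- the stable insertion step PySem.List.sorted is built from (sorted_eq_foldl_insertBy)
def pvIns (y : List Int) (l : List (List Int)) : List (List Int) :=
  PySem.List.insertBy (fun a b => decide (pvStart a < pvStart b)) y l

lemma pvIns_nil (y : List Int) : pvIns y [] = [y] := rfl

lemma pvIns_cons (y b : List Int) (B : List (List Int)) :
    pvIns y (b :: B) = if pvStart y < pvStart b then y :: b :: B else b :: pvIns y B := by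
  simp [pvIns, PySem.List.insertBy]

lemma sorted_snoc (xs : List (List Int)) (x : List Int) :
    PySem.List.sorted (xs ++ [x]) pvStart = pvIns x (PySem.List.sorted xs pvStart) := by
  rw [PySem.List.sorted_eq_foldl_insertBy, PySem.List.sorted_eq_foldl_insertBy, List.foldl_append]
  rfl

lemma pvMergeLoop_nil_right (l : List (List Int)) : pvMergeLoop l [] = l := by
  cases l <;> simp [pvMergeLoop]

-- merging an element inserted on the right commutes with the (left-preferring) merge
lemma pvMerge_insert (A : List (List Int)) : ∀ (B : List (List Int)) (y : List Int),
    pvMergeLoop A (pvIns y B) = pvIns y (pvMergeLoop A B) := by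
  induction A with
  | nil => intro B y; simp [pvMergeLoop]
  | cons a A ihA =>
    intro B y
    induction B with
    | nil =>
      rw [pvIns_nil, pvMergeLoop_nil_right, pvIns_cons]
      by_cases hay : pvStart a ≤ pvStart y
      · rw [if_neg (by omega)]
        simp only [pvMergeLoop, if_pos hay]
        have := ihA [] y
        rw [pvIns_nil] at this
        rw [this, pvMergeLoop_nil_right]
      · rw [if_pos (by omega)]
        simp only [pvMergeLoop, if_neg hay, pvMergeLoop_nil_right]
    | cons b B ihB =>
      rw [pvIns_cons]
      by_cases hyb : pvStart y < pvStart b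
      · rw [if_pos hyb]
        by_cases hay : pvStart a ≤ pvStart y
        · simp only [pvMergeLoop, if_pos hay, if_pos (by omega : pvStart a ≤ pvStart b)]
          have h1 := ihA (b :: B) y
          rw [pvIns_cons, if_pos hyb] at h1
          rw [h1, pvIns_cons, if_neg (by omega)]
        · simp only [pvMergeLoop, if_neg hay]
          by_cases hab : pvStart a ≤ pvStart b
          · rw [if_pos hab, pvIns_cons, if_pos (by omega)]
          · rw [if_neg hab, pvIns_cons, if_pos hyb]
      · rw [if_neg hyb]
        by_cases hab : pvStart a ≤ pvStart b
        · simp only [pvMergeLoop, if_pos hab]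
          have h1 := ihA (b :: B) y
          rw [pvIns_cons, if_neg hyb] at h1
          rw [h1, pvIns_cons, if_neg (by omega)]
        · simp only [pvMergeLoop, if_neg hab]
          rw [ihB, pvIns_cons, if_neg (by omega)]

lemma pvMerge_sorted (xs ys : List (List Int)) :
    pvMergeLoop (PySem.List.sorted xs pvStart) (PySem.List.sorted ys pvStart)
      = PySem.List.sorted (xs ++ ys) pvStart := by
  induction ys using List.reverseRecOn with
  | nil =>
    rw [show PySem.List.sorted ([] : List (List Int)) pvStart = [] from
      (PySem.List.sorted_eq_nil_iff [] pvStart false).2 rfl]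
    rw [pvMergeLoop_nil_right, List.append_nil]
  | append_singleton ys y ih =>
    rw [sorted_snoc, pvMerge_insert, ih, ← List.append_assoc, sorted_snoc]

-- A's hand-written stable merge sort computes Python's sorted(xs, key=iv[0])
lemma msort_eq (l : List (List Int)) :
    merge_sort_intervals l = PySem.List.sorted l pvStart := by
  rw [merge_sort_intervals]
  by_cases h : l.length ≤ 1
  · rw [dif_pos h]
    match l, h with
    | [], _ => rfl
    | [x], _ =>
      exact (PySem.List.sorted_eq_self_of_pairwise [x] pvStart (by simp)).symm
  · rw [dif_neg h, msort_eq (l.take (l.length / 2)), msort_eq (l.drop (l.length / 2)),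
      pvMerge_sorted, List.take_append_drop]
  termination_by l.length
  decreasing_by
    · simp only [List.length_take]; omega
    · simp only [List.length_drop]; omega

lemma pyGetD_snoc_neg_one {α : Type} (l : List α) (x d : α) :
    PySem.List.pyGetD (l ++ [x]) (-1) d = x := by
  unfold PySem.List.pyGetD PySem.List.pyGet? PySem.List.pyIdx?
  have h1 : ¬ ((0:Int) ≤ -1) := by omega
  have h2 : -((l ++ [x]).length : Int) ≤ -1 := by
    simp only [List.length_append, List.length_cons, List.length_nil]
    omega
  rw [if_neg h1, if_pos h2]
  have h3 : (l ++ [x]).length - ((-(-1:Int))).toNat = l.length := by simp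
  rw [h3]
  simp

lemma lastEnd_snoc (g : List (List Int)) (iv : List Int) : pvLastEnd (g ++ [iv]) = pvEnd iv := by
  unfold pvLastEnd
  rw [pyGetD_snoc_neg_one]

lemma place_countP (gs : List (List (List Int))) (iv : List Int) (v : Int)
    (hv : pvStart iv ≤ v) :
    (pvPlace gs iv).countP (fun g => decide (v ≤ pvLastEnd g))
      = gs.countP (fun g => decide (v ≤ pvLastEnd g)) + (if v ≤ pvEnd iv then 1 else 0) := by
  induction gs with
  | nil =>
    simp only [pvPlace, List.countP_cons, List.countP_nil]
    rw [show ([iv] : List (List Int)) = [] ++ [iv] from rfl, lastEnd_snoc]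
    by_cases hve : v ≤ pvEnd iv <;> simp [hve]
  | cons g gs ih =>
    simp only [pvPlace]
    by_cases hg : pvLastEnd g < pvStart iv
    · rw [if_pos hg]
      simp only [List.countP_cons, lastEnd_snoc]
      have h2 : ¬ (v ≤ pvLastEnd g) := by omega
      simp only [h2, decide_false, decide_eq_true_eq]
      by_cases hve : v ≤ pvEnd iv <;> simp [hve]
    · rw [if_neg hg]
      simp only [List.countP_cons, ih]
      omega

lemma place_length_all (gs : List (List (List Int))) (iv : List Int)
    (h : ∀ g ∈ gs, pvStart iv ≤ pvLastEnd g) :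
    (pvPlace gs iv).length = gs.length + 1 := by
  induction gs with
  | nil => rfl
  | cons g gs ih =>
    simp only [pvPlace]
    rw [if_neg (by have := h g (by simp); omega)]
    simp only [List.length_cons]
    rw [ih (fun g' hg' => h g' (by simp [hg']))]

lemma place_length_ex (gs : List (List (List Int))) (iv : List Int)
    (h : ∃ g ∈ gs, pvLastEnd g < pvStart iv) :
    (pvPlace gs iv).length = gs.length := by
  induction gs with
  | nil => simp at h
  | cons g gs ih =>
    simp only [pvPlace]
    by_cases hg : pvLastEnd g < pvStart iv
    · rw [if_pos hg]; simp
    · rw [if_neg hg]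
      simp only [List.length_cons]
      rw [ih]
      obtain ⟨g', hg', hlt⟩ := h
      rcases List.mem_cons.1 hg' with rfl | hmem
      · omega
      · exact ⟨g', hmem, hlt⟩

-- the sweep invariant: best = #groups, and for every bound v at least the last processed
-- start, the active ends ≥ v count exactly the groups whose last end is ≥ v
lemma sweep_eq_place :
    ∀ (R : List (List Int)) (gs : List (List (List Int))) (active : List Int) (best t : Int),
      R.Pairwise (fun a b => pvStart a ≤ pvStart b) →
      (∀ iv ∈ R, t ≤ pvStart iv) →
      best = (gs.length : Int) →
      (∀ v : Int, t ≤ v →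
         (active.filter (fun e => decide (v ≤ e))).length
           = gs.countP (fun g => decide (v ≤ pvLastEnd g))) →
      (R.foldl pvSweepStep (active, best)).2 = ((R.foldl pvPlace gs).length : Int) := by
  intro R
  induction R with
  | nil => intro gs active best t _ _ hbest _; simpa using hbest
  | cons iv R ih =>
    intro gs active best t hsort hge hbest hcnt
    simp only [List.foldl_cons]
    have hts : t ≤ pvStart iv := hge iv (List.mem_cons_self)
    have hc := hcnt (pvStart iv) hts
    set act₁ := active.filter (fun e => decide (pvStart iv ≤ e)) ++ [pvEnd iv] with hact₁
    have hlen₁ : act₁.length = (active.filter (fun e => decide (pvStart iv ≤ e))).length + 1 := by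
      simp [hact₁]
    -- the new count invariant, independent of how pvPlace behaves
    have hcnt' : ∀ v : Int, pvStart iv ≤ v →
        (act₁.filter (fun e => decide (v ≤ e))).length
          = (pvPlace gs iv).countP (fun g => decide (v ≤ pvLastEnd g)) := by
      intro v hv
      rw [place_countP gs iv v hv]
      rw [hact₁, List.filter_append, List.length_append, List.filter_filter]
      have hff : (active.filter (fun e => decide (v ≤ e) && decide (pvStart iv ≤ e))).length
          = (active.filter (fun e => decide (v ≤ e))).length := by
        congr 1
        apply List.filter_congr
        intro e _
        by_cases hve : v ≤ e
        · have : pvStart iv ≤ e := by omega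
          simp [hve, this]
        · simp [hve]
      rw [hff, hcnt v (by omega)]
      by_cases hve : v ≤ pvEnd iv <;> simp [hve]
    have hsort' := hsort.tail
    have hge' : ∀ iv' ∈ R, pvStart iv ≤ pvStart iv' := fun iv' h => (List.pairwise_cons.1 hsort).1 iv' h
    -- case split: does some existing group end before this interval starts?
    by_cases hex : ∃ g ∈ gs, pvLastEnd g < pvStart iv
    · have hlength : (pvPlace gs iv).length = gs.length := place_length_ex gs iv hex
      obtain ⟨g0, hg0, hlt0⟩ := hex
      have hclt : gs.countP (fun g => decide (pvStart iv ≤ pvLastEnd g)) < gs.length := by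
        have hle := List.countP_le_length (l := gs) (p := fun g => decide (pvStart iv ≤ pvLastEnd g))
        have hne : gs.countP (fun g => decide (pvStart iv ≤ pvLastEnd g)) ≠ gs.length := by
          intro heq
          have := List.countP_eq_length.1 heq g0 hg0
          simp at this
          omega
        omega
      have hsmall : ¬ ((act₁.length : Int) > best) := by
        rw [hlen₁, hc, hbest]; push_cast; omega
      have hstep : pvSweepStep (active, best) iv = (act₁, best) := by
        simp only [pvSweepStep]
        rw [← hact₁, if_neg hsmall]
      rw [hstep]
      apply ih (pvPlace gs iv) act₁ best (pvStart iv) hsort' hge' _ hcnt'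
      rw [hlength, hbest]
    · have hall : ∀ g ∈ gs, pvStart iv ≤ pvLastEnd g := by
        intro g hg
        by_contra hcon
        exact hex ⟨g, hg, by omega⟩
      have hcall : gs.countP (fun g => decide (pvStart iv ≤ pvLastEnd g)) = gs.length :=
        List.countP_eq_length.2 (fun g hg => by simpa using hall g hg)
      have hlength : (pvPlace gs iv).length = gs.length + 1 := place_length_all gs iv hall
      have hbig : (act₁.length : Int) > best := by
        rw [hlen₁, hc, hcall, hbest]; push_cast; omega
      have hstep : pvSweepStep (active, best) iv = (act₁, (act₁.length : Int)) := by
        simp only [pvSweepStep]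
        rw [← hact₁, if_pos hbig]
      rw [hstep]
      apply ih (pvPlace gs iv) act₁ _ (pvStart iv) hsort' hge' _ hcnt'
      rw [hlen₁, hc, hcall, hlength]

-- ===== VERDICT (by name: the statement is the Claim_ definition above) =====
theorem count_minimum_groups_spec : Claim_equal_count_minimum_groups := by
  intro intervals _hdom _hpre
  unfold Spec_count_minimum_groups
  by_cases hemp : intervals = []
  · subst hemp; rfl
  · unfold count_minimum_groups count_minimum_groups_alt
    rw [if_neg hemp, msort_eq]
    obtain ⟨m, tl, hS⟩ : ∃ m tl, PySem.List.sorted intervals pvStart = m :: tl := by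
      cases hS : PySem.List.sorted intervals pvStart with
      | nil => exact absurd ((PySem.List.sorted_eq_nil_iff intervals pvStart false).1 hS) hemp
      | cons m tl => exact ⟨m, tl, rfl⟩
    refine (sweep_eq_place (PySem.List.sorted intervals pvStart) [] [] 0 (pvStart m)
      (PySem.List.sorted_pairwise intervals pvStart) ?_ rfl ?_).symm
    · intro iv hiv
      exact PySem.List.key_head_sorted_le intervals pvStart hS iv
        ((PySem.List.mem_sorted intervals pvStart false iv).1 hiv)
    · intro v _; rfl
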